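-- pv_equiv track=rewrite | github.com/l33tdawg/aether | core/precision_analyzer.py | _has_rounding_handling
-- ===== SOURCE A (Python) =====
-- def _has_rounding_handling(contract_content: str, line_number: int) -> bool:
--     """Check if there's rounding handling nearby"""
--     lines = contract_content.split('\n')
--
--     # Check lines before and after
--     start_line = max(0, line_number - 5)
--     end_line = min(len(lines), line_number + 5)
--
--     for i in range(start_line, end_line):
--         if i < len(lines):
--             line = lines[i]
--             # Check for rounding handling patterns (function calls only)
--             if any(func in line.lower() for func in ['round(', 'ceil(', 'floor(', 'truncate(']):
--                 return True
--
--     return False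
-- ===== SOURCE B (Python) =====
-- def _has_rounding_handling(contract_content: str, line_number: int) -> bool:
--     """Check if there's rounding handling nearby"""
--     # Single streaming pass over the whole lowercased text with a running line
--     # counter: no split into lines, no per-line rescans.  The patterns contain
--     # no newline, so a match never crosses a line boundary, and the window test
--     # line_number-5 <= i < line_number+5 (with i a real line index) is the same
--     # as A's clamped range.
--     text = contract_content.lower()
--     patterns = ('round(', 'ceil(', 'floor(', 'truncate(')
--     line_idx = 0
--     for pos in range(len(text)):
--         if text[pos] == '\n':
--             line_idx += 1
--         elif line_number - 5 <= line_idx < line_number + 5 and any(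
--                 text.startswith(p, pos) for p in patterns):
--             return True
--     return False
-- ===== Notes on version B (the rewrite author's own statement) =====
-- stated objective: alternative
-- what changed: B never splits the text into lines: it makes one streaming pass over the whole lowercased string with a running line counter, testing at each position whether the current line index lies in [line_number-5, line_number+5) and whether one of the four patterns starts there, instead of A's build-line-list-then-loop-over-a-clamped-index-range-with-a-per-line-substring-scan.
import Mathlib
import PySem

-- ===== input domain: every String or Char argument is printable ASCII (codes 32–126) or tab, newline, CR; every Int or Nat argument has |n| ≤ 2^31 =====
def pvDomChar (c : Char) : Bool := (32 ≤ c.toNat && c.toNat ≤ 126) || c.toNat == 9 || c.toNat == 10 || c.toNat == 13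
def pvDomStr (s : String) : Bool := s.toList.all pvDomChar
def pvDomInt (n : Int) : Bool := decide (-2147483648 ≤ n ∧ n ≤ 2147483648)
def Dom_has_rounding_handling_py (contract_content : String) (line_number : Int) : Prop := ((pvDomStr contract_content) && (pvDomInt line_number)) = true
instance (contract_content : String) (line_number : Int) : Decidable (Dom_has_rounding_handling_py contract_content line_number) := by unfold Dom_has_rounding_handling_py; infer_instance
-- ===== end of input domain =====

-- B replaces A's split-into-lines + clamped-index-range loop with a per-line substring scan by a
-- single streaming pass over the whole lowercased text that maintains a running line counter and
-- tests the four patterns at each position (objective: alternative algorithm, no line list built).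

-- ===== PORT A =====
def has_rounding_handling_py (contract_content : String) (line_number : Int) : Bool :=
  let lines := (PySem.Str.split? contract_content "\n").getD []   -- split? is always some: sep "\n" ≠ ""
  let start_line := max 0 (line_number - 5)
  let end_line := min (lines.length : Int) (line_number + 5)
  -- 'for i in range(...): if …: return True' / final 'return False' is List.any
  (PySem.List.pyRange start_line end_line 1).any (fun i =>
    if i < (lines.length : Int) then
      match PySem.List.pyGet? lines i with
      | some line =>
          (["round(", "ceil(", "floor(", "truncate("] : List String).any
            (fun func => PySem.Str.isIn func (PySem.Str.lower line))
      | none => false   -- unreachable: 0 ≤ i < len(lines) inside the range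
    else false)

-- ===== PORT B =====
-- the four patterns, as code-point lists (Source B's tuple 'patterns')
def pvAltPats : List (List Char) :=
  ["round(".toList, "ceil(".toList, "floor(".toList, "truncate(".toList]

-- Source B's 'for pos in range(len(text))' with early return: recursion over the suffixes of text,
-- carrying the running line index; text.startswith(p, pos) is p.isPrefixOf (the suffix at pos)
def pvAltLoop (lo hi : Int) : List Char → Int → Bool
  | [], _ => false
  | c :: rest, i =>
    if c = '\n' then pvAltLoop lo hi rest (i + 1)
    else if (decide (lo ≤ i) && decide (i < hi)) && pvAltPats.any (fun p => p.isPrefixOf (c :: rest))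
         then true
         else pvAltLoop lo hi rest i

def has_rounding_handling_py_alt (contract_content : String) (line_number : Int) : Bool :=
  let text := PySem.Chars.lower contract_content.toList   -- contract_content.lower()
  pvAltLoop (line_number - 5) (line_number + 5) text 0

-- ===== PRECONDITION & SPEC =====
def Spec_has_rounding_handling_py (contract_content : String) (line_number : Int) (out : Bool) : Prop := out = has_rounding_handling_py_alt contract_content line_number
instance (contract_content : String) (line_number : Int) (out : Bool) : Decidable (Spec_has_rounding_handling_py contract_content line_number out) := by unfold Spec_has_rounding_handling_py; infer_instance

-- ===== CLAIM (what is proved, stated in full; the proofs are below) =====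
def Claim_equal_has_rounding_handling_py : Prop := ∀ (contract_content : String) (line_number : Int), Dom_has_rounding_handling_py contract_content line_number → Spec_has_rounding_handling_py contract_content line_number (has_rounding_handling_py contract_content line_number)

-- ===== LEMMAS AND PROOFS =====

theorem pySplitOn_go_eq (c : Char) :
    ∀ (fuel : Nat) (l cur : List Char) (acc2 : List (List Char)), l.length ≤ fuel →
    ∃ h t, List.splitOn c l = h :: t ∧
      PySem.Chars.splitOn.go [c] fuel l cur acc2 = acc2.reverse ++ (cur.reverse ++ h) :: t := by
  intro fuel
  induction fuel with
  | zero =>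
    intro l cur acc2 hl
    have : l = [] := List.eq_nil_of_length_eq_zero (by omega)
    subst this
    refine ⟨[], [], by simp [List.splitOn, List.splitOnP_nil], ?_⟩
    simp [PySem.Chars.splitOn.go]
  | succ fuel ih =>
    intro l cur acc2 hl
    cases l with
    | nil =>
      refine ⟨[], [], by simp [List.splitOn, List.splitOnP_nil], ?_⟩
      simp [PySem.Chars.splitOn.go]
    | cons d rest =>
      by_cases hd : d = c
      · subst hd
        obtain ⟨h, t, hsp, hgo⟩ := ih rest [] (cur.reverse :: acc2) (by simp at hl; omega)
        refine ⟨[], h :: t, ?_, ?_⟩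
        · simp only [List.splitOn, List.splitOnP_cons] at hsp ⊢
          rw [if_pos (by simp), hsp]
        · rw [PySem.Chars.splitOn.go]
          rw [if_pos (by simp [List.isPrefixOf])]
          simp only [List.length_cons, List.length_nil, Nat.zero_add, List.drop_succ_cons, List.drop_zero]
          rw [hgo]
          simp
      · obtain ⟨h, t, hsp, hgo⟩ := ih rest (d :: cur) acc2 (by simp at hl; omega)
        refine ⟨d :: h, t, ?_, ?_⟩
        · simp only [List.splitOn, List.splitOnP_cons] at hsp ⊢
          rw [if_neg (by simp [hd]), hsp]
          simp [List.modifyHead]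
        · rw [PySem.Chars.splitOn.go]
          rw [if_neg (by simp [List.isPrefixOf]; exact fun he => hd he.symm)]
          rw [hgo]
          simp


theorem pySplitOn_eq (c : Char) (s : List Char) :
    PySem.Chars.splitOn s [c] = List.splitOn c s := by
  unfold PySem.Chars.splitOn
  obtain ⟨h, t, hsp, hgo⟩ := pySplitOn_go_eq c (s.length + 1) s [] [] (by omega)
  rw [hgo, hsp]
  simp


theorem not_mem_of_mem_splitOn (c : Char) (l : List Char) :
    ∀ p ∈ List.splitOn c l, c ∉ p := by
  induction l with
  | nil => simp [List.splitOn]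
  | cons x xs ih =>
    intro p hp
    simp only [List.splitOn, List.splitOnP_cons] at hp ih
    by_cases hx : x = c
    · simp [hx] at hp
      rcases hp with rfl | hp
      · simp
      · exact ih p hp
    · rw [if_neg (by simp [hx])] at hp
      cases hsp : List.splitOnP (fun a => a == c) xs with
      | nil => exact absurd hsp (List.splitOnP_ne_nil _ _)
      | cons h t =>
        rw [hsp] at hp
        simp only [List.modifyHead] at hp
        rcases List.mem_cons.mp hp with rfl | hp
        · intro hm
          rcases List.mem_cons.mp hm with rfl | hm
          · exact hx rfl
          · exact ih h (hsp ▸ List.mem_cons_self) hm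
        · exact ih p (hsp ▸ List.mem_cons_of_mem _ hp)


theorem lowerChar_ne_newline (c : Char) (h : c ≠ '\n') : PySem.Chars.lowerChar c ≠ '\n' := by
  unfold PySem.Chars.lowerChar PySem.Chars.isupper
  split_ifs with hu
  · have h3 : ('A' ≤ c ∧ c ≤ 'Z') := by
      by_contra hc
      simp [hc] at hu
    have h4 : 65 ≤ c.toNat ∧ c.toNat ≤ 90 := by
      constructor
      · exact h3.1
      · exact h3.2
    intro he
    have h2 := congrArg Char.toNat he
    rw [Char.toNat_ofNat] at h2
    have hv : (c.toNat + 32).isValidChar := by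
      left; omega
    rw [if_pos hv] at h2
    have : ('\n').toNat = 10 := by decide
    omega
  · exact h


theorem map_intercalate {α β : Type} (g : α → β) (s : List α) (l : List (List α)) :
    List.map g (List.intercalate s l) = List.intercalate (List.map g s) (List.map (List.map g) l) := by
  induction l with
  | nil => simp [List.intercalate]
  | cons c rest ih =>
    cases rest with
    | nil => simp [List.intercalate]
    | cons c' r =>
      have h2 : List.intercalate (List.map g s) (List.map g c :: List.map g c' :: List.map (List.map g) r)
          = List.map g c ++ List.map g s ++ List.intercalate (List.map g s) (List.map g c' :: List.map (List.map g) r) := by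
        simp [List.intercalate]
      simp only [List.map_cons]
      rw [h2]
      have h3 : List.intercalate s (c :: c' :: r) = c ++ s ++ List.intercalate s (c' :: r) := by
        simp [List.intercalate]
      rw [h3]
      simp only [List.map_append]
      rw [ih]
      simp

-- a newline-free pattern is a prefix of cs ++ rest (rest empty or starting with '\n') iff of cs


theorem prefix_stop_at_sep (p cs rest : List Char) (hp : '\n' ∉ p)
    (hr : rest = [] ∨ ∃ t, rest = '\n' :: t) : p <+: cs ++ rest ↔ p <+: cs := by
  constructor
  · intro h
    by_cases hl : p.length ≤ cs.length
    · rw [List.prefix_iff_eq_take] at h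
      rw [List.take_append_of_le_length hl] at h
      exact h ▸ List.take_prefix _ _
    · exfalso
      rcases hr with rfl | ⟨t, rfl⟩
      · exact hl (by simpa using h.length_le)
      · have hlen : cs.length < p.length := by omega
        have hg : p[cs.length]'hlen = (cs ++ '\n' :: t)[cs.length]'(by simp) :=
          h.getElem hlen
        have h2 : (cs ++ '\n' :: t)[cs.length]'(by simp) = '\n' := by
          rw [List.getElem_append_right (by omega)]; simp
        rw [h2] at hg
        exact hp (hg ▸ List.getElem_mem hlen)
  · exact fun h => h.trans (cs.prefix_append rest)


theorem pvAltLoop_piece_iff (lo hi i : Int) (cs rest : List Char) (hcs : '\n' ∉ cs)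
    (hr : rest = [] ∨ ∃ t, rest = '\n' :: t) :
    pvAltLoop lo hi (cs ++ rest) i = true ↔
      ((lo ≤ i ∧ i < hi) ∧ ∃ p ∈ pvAltPats, p <:+: cs) ∨ pvAltLoop lo hi rest i = true := by
  induction cs with
  | nil =>
    have hnone : ¬ ∃ p ∈ pvAltPats, p <:+: ([] : List Char) := by decide
    simp only [List.nil_append]
    constructor
    · exact Or.inr
    · rintro (⟨_, he⟩ | h)
      · exact absurd he hnone
      · exact h
  | cons d cs' ih =>
    have hd : ¬ d = '\n' := fun he => hcs (he ▸ List.mem_cons_self)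
    have hcs' : '\n' ∉ cs' := fun hm => hcs (List.mem_cons_of_mem _ hm)
    have hpats : ∀ p ∈ pvAltPats, '\n' ∉ p := by decide
    have hstep : pvAltLoop lo hi ((d :: cs') ++ rest) i =
        if (decide (lo ≤ i) && decide (i < hi)) && pvAltPats.any (fun p => p.isPrefixOf (d :: cs' ++ rest))
        then true else pvAltLoop lo hi (cs' ++ rest) i := by
      simp only [List.cons_append, pvAltLoop, if_neg hd]
      rfl
    rw [hstep]
    have hcond : ((decide (lo ≤ i) && decide (i < hi)) && pvAltPats.any (fun p => p.isPrefixOf (d :: cs' ++ rest))) = true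
        ↔ ((lo ≤ i ∧ i < hi) ∧ ∃ p ∈ pvAltPats, p <+: d :: cs') := by
      simp only [Bool.and_eq_true, decide_eq_true_eq, List.any_eq_true]
      constructor
      · rintro ⟨⟨h1, h2⟩, p, hp, hpre⟩
        rw [List.isPrefixOf_iff_prefix] at hpre
        rw [show (d :: cs' ++ rest) = (d :: cs') ++ rest from rfl,
            prefix_stop_at_sep p (d :: cs') rest (hpats p hp) hr] at hpre
        exact ⟨⟨h1, h2⟩, p, hp, hpre⟩
      · rintro ⟨⟨h1, h2⟩, p, hp, hpre⟩
        refine ⟨⟨h1, h2⟩, p, hp, ?_⟩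
        rw [List.isPrefixOf_iff_prefix,
            show (d :: cs' ++ rest) = (d :: cs') ++ rest from rfl,
            prefix_stop_at_sep p (d :: cs') rest (hpats p hp) hr]
        exact hpre
    have hinf : ∀ p : List Char, p <:+: d :: cs' ↔ p <+: d :: cs' ∨ p <:+: cs' :=
      fun p => List.infix_cons_iff
    by_cases hc : ((lo ≤ i ∧ i < hi) ∧ ∃ p ∈ pvAltPats, p <+: d :: cs')
    · rw [if_pos (hcond.mpr hc)]
      obtain ⟨hpos, p, hp, hpre⟩ := hc
      constructor
      · intro _
        exact Or.inl ⟨hpos, p, hp, (hinf p).mpr (Or.inl hpre)⟩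
      · intro _; rfl
    · rw [if_neg (fun h => hc (hcond.mp h))]
      rw [ih hcs']
      constructor
      · rintro (⟨hpos, p, hp, hi'⟩ | hrest)
        · exact Or.inl ⟨hpos, p, hp, (hinf p).mpr (Or.inr hi')⟩
        · exact Or.inr hrest
      · rintro (⟨hpos, p, hp, hi'⟩ | hrest)
        · rcases (hinf p).mp hi' with hpre | hi''
          · exact absurd ⟨hpos, p, hp, hpre⟩ hc
          · exact Or.inl ⟨hpos, p, hp, hi''⟩
        · exact Or.inr hrest


theorem pvAltLoop_intercalate_iff (lo hi : Int) :
    ∀ (css : List (List Char)) (i : Int), (∀ cs ∈ css, '\n' ∉ cs) →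
    (pvAltLoop lo hi (List.intercalate ['\n'] css) i = true ↔
      ∃ j, ∃ hj : j < css.length, (lo ≤ i + (j : Int) ∧ i + (j : Int) < hi) ∧
        ∃ p ∈ pvAltPats, p <:+: css[j]) := by
  intro css
  induction css with
  | nil =>
    intro i _
    simp [List.intercalate, pvAltLoop]
  | cons cs rest ih =>
    intro i hnl
    have hcs : '\n' ∉ cs := hnl cs List.mem_cons_self
    have hrest : ∀ x ∈ rest, '\n' ∉ x := fun x hx => hnl x (List.mem_cons_of_mem _ hx)
    cases rest with
    | nil =>
      have hic : List.intercalate ['\n'] [cs] = cs ++ [] := by simp [List.intercalate]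
      rw [hic, pvAltLoop_piece_iff lo hi i cs [] hcs (Or.inl rfl)]
      constructor
      · rintro (⟨hpos, hex⟩ | hfalse)
        · exact ⟨0, by simp, by simpa using hpos, by simpa using hex⟩
        · simp [pvAltLoop] at hfalse
      · rintro ⟨j, hj, hpos, hex⟩
        have : j = 0 := by simpa using hj
        subst this
        exact Or.inl ⟨by simpa using hpos, by simpa using hex⟩
    | cons cs' r =>
      have hic : List.intercalate ['\n'] (cs :: cs' :: r)
          = cs ++ '\n' :: List.intercalate ['\n'] (cs' :: r) := by
        simp [List.intercalate]
      rw [hic, pvAltLoop_piece_iff lo hi i cs _ hcs (Or.inr ⟨_, rfl⟩)]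
      have hstep : pvAltLoop lo hi ('\n' :: List.intercalate ['\n'] (cs' :: r)) i
          = pvAltLoop lo hi (List.intercalate ['\n'] (cs' :: r)) (i + 1) := by
        simp [pvAltLoop]
      rw [hstep, ih (i + 1) hrest]
      constructor
      · rintro (⟨hpos, hex⟩ | ⟨j, hj, hpos, hex⟩)
        · exact ⟨0, by simp, by simpa using hpos, by simpa using hex⟩
        · refine ⟨j + 1, by simpa using hj, ?_, by simpa using hex⟩
          push_cast
          push_cast at hpos
          omega
      · rintro ⟨j, hj, hpos, hex⟩
        cases j with
        | zero => exact Or.inl ⟨by simpa using hpos, by simpa using hex⟩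
        | succ j' =>
          refine Or.inr ⟨j', by simpa using hj, ?_, by simpa using hex⟩
          push_cast at hpos
          omega


theorem any_range_get (xs : List String) (p : String → Bool) :
    ∀ (k a : Nat), a + k ≤ xs.length →
    (PySem.List.pyRange (a : Int) ((a : Int) + (k : Int)) 1).any (fun i =>
      if i < (xs.length : Int) then
        match PySem.List.pyGet? xs i with
        | some line => p line
        | none => false
      else false)
    = ((xs.drop a).take k).any p := by
  intro k
  induction k with
  | zero =>
    intro a _
    rw [show ((a:Int) + ((0:Nat):Int) : Int) = (a:Int) by simp]
    rw [PySem.List.pyRange_one_eq_nil le_rfl]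
    simp
  | succ k ih =>
    intro a ha
    have hlt : (a:Int) < (a:Int) + ((k+1 : Nat):Int) := by push_cast; omega
    rw [PySem.List.pyRange_one_cons hlt]
    have hdrop : xs.drop a = xs[a]'(by omega) :: xs.drop (a+1) := by
      exact (List.getElem_cons_drop (by omega)).symm
    rw [hdrop]
    simp only [List.any_cons, List.take_succ_cons]
    have hget : PySem.List.pyGet? xs (a:Int) = some (xs[a]'(by omega)) := by
      rw [PySem.List.pyGet?_natCast]
      exact List.getElem?_eq_getElem (by omega)
    have harg : ((a:Int) + 1) = ((a+1 : Nat):Int) := by push_cast; ring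
    have hend : ((a:Int) + ((k+1:Nat):Int)) = ((a+1:Nat):Int) + ((k:Nat):Int) := by push_cast; ring
    rw [hend, harg]
    rw [ih (a+1) (by omega)]
    rw [if_pos (show (a:Int) < (xs.length:Int) by omega), hget]

-- membership in a take/drop window, by absolute index


theorem mem_window_iff (xs : List String) (m k : Nat) (h : m + k ≤ xs.length) (x : String) :
    x ∈ (xs.drop m).take k ↔ ∃ j, ∃ hj : j < xs.length, m ≤ j ∧ j < m + k ∧ xs[j] = x := by
  have hlen : ((xs.drop m).take k).length = k := by
    simp [List.length_take, List.length_drop]; omega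
  constructor
  · intro hm
    obtain ⟨t, ht, hget⟩ := List.mem_iff_getElem.mp hm
    have ht' : t < k := by omega
    refine ⟨m + t, by omega, by omega, by omega, ?_⟩
    rw [← hget]
    rw [List.getElem_take, List.getElem_drop]
  · rintro ⟨j, hj, hmj, hjk, hget⟩
    apply List.mem_iff_getElem.mpr
    refine ⟨j - m, by omega, ?_⟩
    rw [List.getElem_take, List.getElem_drop]
    rw [← hget]
    congr 1
    omega


theorem patsA_iff (l : List Char) :
    ((["round(", "ceil(", "floor(", "truncate("] : List String).any
        (fun f => PySem.Str.isIn f (PySem.Str.lower (String.ofList l))) = true)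
      ↔ ∃ p ∈ pvAltPats, p <:+: List.map PySem.Chars.lowerChar l := by
  have h : ∀ f : String, PySem.Str.isIn f (PySem.Str.lower (String.ofList l)) = true
      ↔ f.toList <:+: List.map PySem.Chars.lowerChar l := by
    intro f
    rw [PySem.Str.isIn_iff_infix, PySem.Str.toList_lower, String.toList_ofList]
    unfold PySem.Chars.lower
    exact Iff.rfl
  simp only [List.any_eq_true, h, pvAltPats]
  constructor
  · rintro ⟨f, hf, hi⟩
    fin_cases hf <;> exact ⟨_, by simp, hi⟩
  · rintro ⟨p, hp, hi⟩
    fin_cases hp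
    · exact ⟨"round(", by simp, hi⟩
    · exact ⟨"ceil(", by simp, hi⟩
    · exact ⟨"floor(", by simp, hi⟩
    · exact ⟨"truncate(", by simp, hi⟩


theorem main_core (s : List Char) (line_number : Int) :
    has_rounding_handling_py (String.ofList s) line_number
      = has_rounding_handling_py_alt (String.ofList s) line_number := by
  have hsplit : (PySem.Str.split? (String.ofList s) "\n").getD []
      = List.map String.ofList (List.splitOn '\n' s) := by
    simp [PySem.Str.split?, PySem.Chars.split?, String.toList_ofList]
    rw [pySplitOn_eq]
  set css := List.splitOn '\n' s with hcss
  -- the common characterization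
  set E : Prop := ∃ j, ∃ hj : j < css.length,
      (line_number - 5 ≤ (j : Int) ∧ (j : Int) < line_number + 5) ∧
      ∃ p ∈ pvAltPats, p <:+: List.map PySem.Chars.lowerChar css[j] with hE
  have hpieces : ∀ cs ∈ List.map (List.map PySem.Chars.lowerChar) css, '\n' ∉ cs := by
    intro cs hcs hmem
    obtain ⟨c0, hc0, rfl⟩ := List.mem_map.mp hcs
    obtain ⟨ch, hch, hlc⟩ := List.mem_map.mp hmem
    exact lowerChar_ne_newline ch (fun he => not_mem_of_mem_splitOn '\n' s c0 hc0 (he ▸ hch)) hlc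
  -- B-side
  have hB : has_rounding_handling_py_alt (String.ofList s) line_number = true ↔ E := by
    show pvAltLoop (line_number - 5) (line_number + 5)
        (PySem.Chars.lower (String.ofList s).toList) 0 = true ↔ E
    have htext : PySem.Chars.lower (String.ofList s).toList
        = List.intercalate ['\n'] (List.map (List.map PySem.Chars.lowerChar) css) := by
      rw [String.toList_ofList]
      conv_lhs => rw [show s = ['\n'].intercalate css from (List.intercalate_splitOn s '\n').symm]
      unfold PySem.Chars.lower
      rw [map_intercalate]
      rfl
    rw [htext, pvAltLoop_intercalate_iff _ _ _ 0 hpieces, hE]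
    constructor
    · rintro ⟨j, hj, hpos, p, hp, hi⟩
      rw [List.length_map] at hj
      rw [List.getElem_map] at hi
      exact ⟨j, hj, by constructor <;> omega, p, hp, hi⟩
    · rintro ⟨j, hj, hpos, p, hp, hi⟩
      refine ⟨j, by simpa using hj, by constructor <;> omega, p, hp, ?_⟩
      rw [List.getElem_map]
      exact hi
  -- A-side
  have hA : has_rounding_handling_py (String.ofList s) line_number = true ↔ E := by
    show (PySem.List.pyRange (max 0 (line_number - 5))
        (min ((((PySem.Str.split? (String.ofList s) "\n").getD []).length : Int)) (line_number + 5)) 1).any _ = true ↔ E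
    rw [hsplit]
    set lines := List.map String.ofList css with hlines
    have hlen : lines.length = css.length := by simp [hlines]
    set a := max 0 (line_number - 5) with ha
    set b := min ((lines.length : Int)) (line_number + 5) with hb
    have ha0 : 0 ≤ a := le_max_left _ _
    have hblen : b ≤ (lines.length : Int) := min_le_left _ _
    by_cases hab : b ≤ a
    · rw [PySem.List.pyRange_one_eq_nil hab]
      simp only [List.any_nil]
      constructor
      · intro h; exact absurd h (by simp)
      · rintro ⟨j, hj, hpos, _⟩
        exfalso
        rw [← hlen] at hj
        omega
    · push Not at hab
      obtain ⟨m, hm⟩ := Int.eq_ofNat_of_zero_le ha0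
      obtain ⟨k, hk⟩ := Int.eq_ofNat_of_zero_le (show (0:Int) ≤ b - a by omega)
      have hbmk : b = (m : Int) + (k : Int) := by omega
      rw [hm, hbmk]
      have hmk : m + k ≤ lines.length := by
        have : ((m + k : Nat) : Int) ≤ (lines.length : Int) := by push_cast; omega
        exact_mod_cast this
      rw [any_range_get lines _ k m hmk]
      rw [List.any_eq_true]
      constructor
      · rintro ⟨x, hx, hpx⟩
        obtain ⟨j, hj, hmj, hjk, rfl⟩ := (mem_window_iff lines m k hmk x).mp hx
        have hjc : j < css.length := by omega
        have hget : lines[j]'hj = String.ofList (css[j]'hjc) := by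
          simp [hlines]
        rw [hget] at hpx
        obtain ⟨p, hp, hi⟩ := (patsA_iff (css[j]'hjc)).mp hpx
        refine ⟨j, hjc, ?_, p, hp, hi⟩
        constructor <;> omega
      · rintro ⟨j, hj, hpos, p, hp, hi⟩
        have hjl : j < lines.length := by omega
        refine ⟨lines[j]'hjl, (mem_window_iff lines m k hmk _).mpr ⟨j, hjl, ?_, ?_, rfl⟩, ?_⟩
        · omega
        · omega
        · have hget : lines[j]'hjl = String.ofList (css[j]'hj) := by
            simp [hlines]
          rw [hget]
          exact (patsA_iff (css[j]'hj)).mpr ⟨p, hp, hi⟩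
  rw [Bool.eq_iff_iff, hA, hB]


-- ===== VERDICT (by name: the statement is the Claim_ definition above) =====
theorem has_rounding_handling_py_spec : Claim_equal_has_rounding_handling_py := by
  intro cc ln _
  show _ = _
  have h := main_core cc.toList ln
  simpa using h
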